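-- pv_equiv track=rewrite | github.com/Leanch2002/IP-1C-2025 | Practica 7/practica_7.py | pos_secuencia_ordenada_mas_larga
-- ===== SOURCE A (Python) =====
-- def pos_secuencia_ordenada_mas_larga(s: list[int]) -> int:
--     max_inicio: int = 0
--     max_longitud: int = 1
--
--     inicio: int = 0
--     longitud: int = 1
--
--     for i in range(1, len(s)):
--         if s[i - 1] < s[i]:
--             longitud += 1
--         else:
--             if longitud > max_longitud:
--                 max_longitud = longitud
--                 max_inicio = inicio
--             inicio = i
--             longitud = 1
--
--     if longitud > max_longitud:
--         max_inicio = inicio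
--
--     return max_inicio
-- ===== SOURCE B (Python) =====
-- def pos_secuencia_ordenada_mas_larga(s: list[int]) -> int:
--     if not s:
--         return 0
--     runs = []
--     start = 0
--     for i in range(1, len(s)):
--         if s[i - 1] >= s[i]:
--             runs.append((start, i - start))
--             start = i
--     runs.append((start, len(s) - start))
--     return max(runs, key=lambda r: r[1])[0]
-- ===== Notes on version B (the rewrite author's own statement) =====
-- stated objective: alternative
-- what changed: A tracks a running best (start,length) inline with end-of-loop patch-up; B first materialises the table of all maximal increasing runs in one scan and then selects the first longest run with max(key=length).
import Mathlib
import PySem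

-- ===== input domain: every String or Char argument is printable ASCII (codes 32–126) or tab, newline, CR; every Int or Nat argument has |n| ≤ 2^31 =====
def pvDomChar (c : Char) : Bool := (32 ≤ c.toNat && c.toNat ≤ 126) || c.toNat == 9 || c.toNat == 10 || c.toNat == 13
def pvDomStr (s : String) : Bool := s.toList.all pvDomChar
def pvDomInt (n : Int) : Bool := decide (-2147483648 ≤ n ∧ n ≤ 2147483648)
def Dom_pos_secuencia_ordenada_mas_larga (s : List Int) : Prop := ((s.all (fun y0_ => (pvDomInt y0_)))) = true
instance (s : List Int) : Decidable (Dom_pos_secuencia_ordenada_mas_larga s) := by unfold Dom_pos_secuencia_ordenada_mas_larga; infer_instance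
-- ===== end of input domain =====

-- B replaces A's inline running-best bookkeeping by an explicit table of maximal increasing
-- runs built in one scan, followed by a first-max selection pass (objective: alternative).

-- ===== PORT A =====
-- loop body of A's for-loop, state = (max_inicio, max_longitud, inicio, longitud)
def pvStepA (s : List Int) (acc : Int × Int × Int × Int) (i : Int) : Int × Int × Int × Int :=
  if PySem.List.pyGetD s (i - 1) 0 < PySem.List.pyGetD s i 0 then
    (acc.1, acc.2.1, acc.2.2.1, acc.2.2.2 + 1)
  else
    if acc.2.2.2 > acc.2.1 then (acc.2.2.1, acc.2.2.2, i, 1)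
    else (acc.1, acc.2.1, i, 1)

-- A's final `if longitud > max_longitud` check and return
def pvFinishA (st : Int × Int × Int × Int) : Int :=
  if st.2.2.2 > st.2.1 then st.2.2.1 else st.1

def pos_secuencia_ordenada_mas_larga (s : List Int) : Int :=
  pvFinishA ((PySem.List.pyRange 1 (s.length : Int) 1).foldl (pvStepA s) (0, 1, 0, 1))

-- ===== PORT B =====
-- loop body of B's scan, state = (runs, start)
def pvStepB (s : List Int) (acc : List (Int × Int) × Int) (i : Int) : List (Int × Int) × Int :=
  if PySem.List.pyGetD s (i - 1) 0 ≥ PySem.List.pyGetD s i 0 then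
    (acc.1 ++ [(acc.2, i - acc.2)], i)
  else acc

-- B's `runs.append((start, len(s) - start)); return max(runs, key=...)[0]`
-- (runs is nonempty here, so maxD's default is never used: it only totalizes Python's max)
def pvFinishB (s : List Int) (st : List (Int × Int) × Int) : Int :=
  (PySem.List.maxD (st.1 ++ [(st.2, (s.length : Int) - st.2)]) (fun r => r.2) (0, 0)).1

def pos_secuencia_ordenada_mas_larga_alt (s : List Int) : Int :=
  if s = [] then 0
  else pvFinishB s ((PySem.List.pyRange 1 (s.length : Int) 1).foldl (pvStepB s) ([], 0))

-- ===== PRECONDITION & SPEC =====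
def Spec_pos_secuencia_ordenada_mas_larga (s : List Int) (out : Int) : Prop := out = pos_secuencia_ordenada_mas_larga_alt s
instance (s : List Int) (out : Int) : Decidable (Spec_pos_secuencia_ordenada_mas_larga s out) := by unfold Spec_pos_secuencia_ordenada_mas_larga; infer_instance

-- ===== CLAIM (what is proved, stated in full; the proofs are below) =====
def Claim_equal_pos_secuencia_ordenada_mas_larga : Prop := ∀ (s : List Int), Dom_pos_secuencia_ordenada_mas_larga s → Spec_pos_secuencia_ordenada_mas_larga s (pos_secuencia_ordenada_mas_larga s)

-- ===== LEMMAS AND PROOFS =====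

def pvStateA (s : List Int) (n : Int) : Int × Int × Int × Int :=
  (PySem.List.pyRange 1 n 1).foldl (pvStepA s) (0, 1, 0, 1)

def pvStateB (s : List Int) (n : Int) : List (Int × Int) × Int :=
  (PySem.List.pyRange 1 n 1).foldl (pvStepB s) ([], 0)

-- the coupling invariant between A's running state and B's run table after the prefix 1..n
def pvInv (n : Int) (a : Int × Int × Int × Int) (b : List (Int × Int) × Int) : Prop :=
  a.2.2.1 = b.2 ∧ a.2.2.2 = n - b.2 ∧ 0 ≤ b.2 ∧
  PySem.List.max? b.1 (fun r => r.2) = (if b.1 = [] then none else some (a.1, a.2.1)) ∧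
  (b.1 = [] → a.1 = 0 ∧ a.2.1 = 1 ∧ b.2 = 0)

theorem pv_max?_append_singleton (xs : List (Int × Int)) (y : Int × Int) :
    PySem.List.max? (xs ++ [y]) (fun r => r.2) =
      (PySem.List.max? xs (fun r => r.2)).elim (some y)
        (fun m => if m.2 < y.2 then some y else some m) := by
  cases hF : PySem.List.max? xs (fun r => r.2) with
  | none =>
    simp only [PySem.List.max?] at hF ⊢
    rw [List.foldl_append, hF]
    rfl
  | some m =>
    simp only [PySem.List.max?] at hF ⊢
    rw [List.foldl_append, hF]
    rfl

theorem pv_state_succ (s : List Int) (n : Int) (h : 1 ≤ n) :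
    pvStateA s (n + 1) = pvStepA s (pvStateA s n) n ∧
    pvStateB s (n + 1) = pvStepB s (pvStateB s n) n := by
  unfold pvStateA pvStateB
  rw [PySem.List.pyRange_one_succ_right h]
  simp [List.foldl_append]

theorem pv_inv_holds (s : List Int) :
    ∀ (k : Nat), (k : Int) + 1 ≤ (s.length : Int) →
      pvInv ((k : Int) + 1) (pvStateA s ((k : Int) + 1)) (pvStateB s ((k : Int) + 1)) := by
  intro k
  induction k with
  | zero =>
    intro _
    unfold pvStateA pvStateB
    rw [PySem.List.pyRange_one_eq_nil (by norm_num)]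
    simp [pvInv, PySem.List.max?]
  | succ k ih =>
    intro hle
    have hk : (k : Int) + 1 ≤ (s.length : Int) := by push_cast at hle ⊢; omega
    have ihv := ih hk
    have hn1 : (1 : Int) ≤ (k : Int) + 1 := by omega
    have hstep := pv_state_succ s ((k : Int) + 1) hn1
    have hcast : ((k + 1 : Nat) : Int) + 1 = ((k : Int) + 1) + 1 := by push_cast; ring
    set n : Int := (k : Int) + 1 with hn
    rcases ha : pvStateA s n with ⟨mi, ml, ini, lon⟩
    rcases hb : pvStateB s n with ⟨runs, start⟩
    rw [ha, hb] at ihv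
    obtain ⟨h1, h2, h3, h4, h5⟩ := ihv
    simp only at h1 h2 h3 h4 h5
    rw [hcast, hstep.1, hstep.2, ha, hb]
    by_cases hc : PySem.List.pyGetD s (n - 1) 0 < PySem.List.pyGetD s n 0
    · -- run continues: A extends longitud, B unchanged
      have hcB : ¬ PySem.List.pyGetD s (n - 1) 0 ≥ PySem.List.pyGetD s n 0 := not_le.mpr hc
      simp only [pvStepA, pvStepB, if_pos hc, if_neg hcB, pvInv]
      exact ⟨h1, by omega, h3, h4, h5⟩
    · -- run closes at n
      have hcB : PySem.List.pyGetD s (n - 1) 0 ≥ PySem.List.pyGetD s n 0 := not_lt.mp hc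
      have hne : runs ++ [(start, n - start)] ≠ [] := by simp
      simp only [pvStepA, pvStepB, if_neg hc, if_pos hcB, pvInv]
      by_cases hgt : lon > ml
      · rw [if_pos hgt]
        dsimp only
        refine ⟨rfl, by omega, by omega, ?_, by simp⟩
        rw [if_neg hne, pv_max?_append_singleton, h4]
        by_cases hruns : runs = []
        · obtain ⟨hmi, hml, hst⟩ := h5 hruns
          rw [if_pos hruns]
          dsimp only [Option.elim]
          rw [h1, h2]
        · rw [if_neg hruns]
          dsimp only [Option.elim]
          rw [if_pos (by omega : ml < n - start), h1, h2]
      · rw [if_neg hgt]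
        dsimp only
        refine ⟨rfl, by omega, by omega, ?_, by simp⟩
        rw [if_neg hne, pv_max?_append_singleton, h4]
        by_cases hruns : runs = []
        · obtain ⟨hmi, hml, hst⟩ := h5 hruns
          rw [if_pos hruns]
          dsimp only [Option.elim]
          have hn1' : n - start = 1 := by omega
          rw [hn1', hmi, hml, hst]
        · rw [if_neg hruns]
          dsimp only [Option.elim]
          rw [if_neg (by omega : ¬ ml < n - start)]

-- ===== VERDICT (by name: the statement is the Claim_ definition above) =====
theorem pos_secuencia_ordenada_mas_larga_spec : Claim_equal_pos_secuencia_ordenada_mas_larga := by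
  unfold Claim_equal_pos_secuencia_ordenada_mas_larga Spec_pos_secuencia_ordenada_mas_larga
  intro s _
  by_cases hs : s = []
  · subst hs
    simp [pos_secuencia_ordenada_mas_larga, pos_secuencia_ordenada_mas_larga_alt,
      pvFinishA, PySem.List.pyRange_one_eq_nil]
  · have hlen : 1 ≤ s.length := List.length_pos_iff.mpr hs
    obtain ⟨k, hk⟩ : ∃ k : Nat, (k : Int) + 1 = (s.length : Int) :=
      ⟨s.length - 1, by omega⟩
    have hinv := pv_inv_holds s k (by omega)
    rw [hk] at hinv
    rcases ha : pvStateA s (s.length : Int) with ⟨mi, ml, ini, lon⟩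
    rcases hb : pvStateB s (s.length : Int) with ⟨runs, start⟩
    rw [ha, hb] at hinv
    obtain ⟨h1, h2, h3, h4, h5⟩ := hinv
    simp only at h1 h2 h3 h4 h5
    show pvFinishA (pvStateA s (s.length : Int)) =
      pos_secuencia_ordenada_mas_larga_alt s
    unfold pos_secuencia_ordenada_mas_larga_alt
    rw [if_neg hs]
    show _ = pvFinishB s (pvStateB s (s.length : Int))
    rw [ha, hb]
    unfold pvFinishA pvFinishB PySem.List.maxD
    dsimp only
    rw [pv_max?_append_singleton, h4]
    by_cases hruns : runs = []
    · obtain ⟨hmi, hml, hst⟩ := h5 hruns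
      rw [if_pos hruns]
      dsimp only [Option.elim, Option.getD_some]
      by_cases hgt : lon > ml
      · rw [if_pos hgt, h1]
      · rw [if_neg hgt, hmi, hst]
    · rw [if_neg hruns]
      dsimp only [Option.elim]
      by_cases hgt : lon > ml
      · rw [if_pos hgt, if_pos (by omega : ml < (s.length : Int) - start)]
        dsimp only [Option.getD_some]
        rw [h1]
      · rw [if_neg hgt, if_neg (by omega : ¬ ml < (s.length : Int) - start)]
        rfl
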